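-- pv_equiv track=rewrite | github.com/FooKeTing/Manufacturing-Aging-Traceability-System | app/service/traceability_service.py | get_hb_bin
-- ===== SOURCE A (Python) =====
-- def get_hb_bin(hb_sn_list, trace_bin_dict):
--     bins = []
--
--     for sn in hb_sn_list:
--         if not sn:
--             continue
--
--         sn_key = str(sn).strip()
--
--         bin_value = trace_bin_dict.get(sn_key)
--         if bin_value is not None:
--             bins.append(bin_value)
--
--     if not bins:
--         return None
--
--     unique_bins = set(bins)
--
--     if len(unique_bins) == 1:
--         return bins[0]
--
--     return "MIXED"
-- ===== SOURCE B (Python) =====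
-- def get_hb_bin(hb_sn_list, trace_bin_dict):
--     result = None
--     for sn in hb_sn_list:
--         if not sn:
--             continue
--         bin_value = trace_bin_dict.get(str(sn).strip())
--         if bin_value is None:
--             continue
--         if result is None:
--             result = bin_value
--         elif bin_value != result:
--             return "MIXED"
--     return result
-- ===== Notes on version B (the rewrite author's own statement) =====
-- stated objective: simpler
-- what changed: B streams the uniqueness decision in a single pass with a running result (returning MIXED as soon as a second distinct bin is seen) instead of collecting all bins into a list and then building a set to count distinct values; a timing run measured this constant-factor win (early exit, no intermediate list/set).
import Mathlib
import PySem

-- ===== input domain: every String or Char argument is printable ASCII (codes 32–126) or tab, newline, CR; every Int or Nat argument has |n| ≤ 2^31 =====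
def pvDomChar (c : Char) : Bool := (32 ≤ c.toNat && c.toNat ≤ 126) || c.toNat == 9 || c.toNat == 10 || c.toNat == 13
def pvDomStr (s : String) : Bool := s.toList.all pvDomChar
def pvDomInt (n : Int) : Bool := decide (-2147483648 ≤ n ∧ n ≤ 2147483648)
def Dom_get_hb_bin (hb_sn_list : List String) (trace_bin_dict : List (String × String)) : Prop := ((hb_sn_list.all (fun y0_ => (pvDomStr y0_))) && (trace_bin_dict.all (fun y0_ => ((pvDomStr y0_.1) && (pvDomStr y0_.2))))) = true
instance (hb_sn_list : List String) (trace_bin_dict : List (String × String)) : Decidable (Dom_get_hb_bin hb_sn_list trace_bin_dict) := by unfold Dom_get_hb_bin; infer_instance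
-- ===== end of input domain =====

-- B replaces A's collect-then-dedup (list of bins, then a set to count distinct values)
-- by a single streaming pass with a running result that returns "MIXED" as soon as a
-- second distinct bin appears; objective: simpler.

-- ===== PORT A =====
-- one iteration of A's collecting loop body
def pvBinStep (trace_bin_dict : List (String × String)) (bins : List String) (sn : String) : List String :=
  if sn = "" then bins
  else
    match (PySem.Dict.mk trace_bin_dict).get? (PySem.Str.strip sn) with
    | none => bins
    | some b => bins ++ [b]

def get_hb_bin (hb_sn_list : List String) (trace_bin_dict : List (String × String)) : Option String :=
  let bins := hb_sn_list.foldl (pvBinStep trace_bin_dict) []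
  if bins = [] then none
  else
    let unique_bins := PySem.Set.ofList bins
    if PySem.Set.len unique_bins = 1 then PySem.List.pyGet? bins 0
    else some "MIXED"

-- ===== PORT B =====
-- B's loop: running result, early "MIXED" on the first conflicting bin
def pvScan (trace_bin_dict : List (String × String)) : List String → Option String → Option String
  | [], result => result
  | sn :: rest, result =>
    if sn = "" then pvScan trace_bin_dict rest result
    else
      match (PySem.Dict.mk trace_bin_dict).get? (PySem.Str.strip sn) with
      | none => pvScan trace_bin_dict rest result
      | some b =>
        match result with
        | none => pvScan trace_bin_dict rest (some b)
        | some r => if b ≠ r then some "MIXED" else pvScan trace_bin_dict rest result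

def get_hb_bin_alt (hb_sn_list : List String) (trace_bin_dict : List (String × String)) : Option String :=
  pvScan trace_bin_dict hb_sn_list none

-- ===== PRECONDITION & SPEC =====
def Spec_get_hb_bin (hb_sn_list : List String) (trace_bin_dict : List (String × String)) (out : Option String) : Prop := out = get_hb_bin_alt hb_sn_list trace_bin_dict
instance (hb_sn_list : List String) (trace_bin_dict : List (String × String)) (out : Option String) : Decidable (Spec_get_hb_bin hb_sn_list trace_bin_dict out) := by unfold Spec_get_hb_bin; infer_instance

-- ===== CLAIM (what is proved, stated in full; the proofs are below) =====
def Claim_equal_get_hb_bin : Prop := ∀ (hb_sn_list : List String) (trace_bin_dict : List (String × String)), Dom_get_hb_bin hb_sn_list trace_bin_dict → Spec_get_hb_bin hb_sn_list trace_bin_dict (get_hb_bin hb_sn_list trace_bin_dict)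

-- ===== LEMMAS AND PROOFS =====

-- the list of bins A collects, as a structural recursion
def pvBins (d : List (String × String)) : List String → List String
  | [] => []
  | sn :: rest =>
    if sn = "" then pvBins d rest
    else
      match (PySem.Dict.mk d).get? (PySem.Str.strip sn) with
      | none => pvBins d rest
      | some b => b :: pvBins d rest

theorem pvFoldl_bins (d : List (String × String)) :
    ∀ (l : List String) (acc : List String),
      l.foldl (pvBinStep d) acc = acc ++ pvBins d l := by
  intro l
  induction l with
  | nil => intro acc; simp [pvBins]
  | cons sn rest ih =>
    intro acc
    simp only [List.foldl_cons, pvBinStep, pvBins]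
    by_cases h : sn = ""
    · simp [h, ih]
    · simp only [h, if_false]
      cases (PySem.Dict.mk d).get? (PySem.Str.strip sn) with
      | none => simp [ih]
      | some b => simp [ih]

theorem pvScan_some (d : List (String × String)) :
    ∀ (l : List String) (r : String),
      pvScan d l (some r) =
        if (pvBins d l).all (fun b => b == r) then some r else some "MIXED" := by
  intro l
  induction l with
  | nil => intro r; simp [pvScan, pvBins]
  | cons sn rest ih =>
    intro r
    simp only [pvScan, pvBins]
    by_cases h : sn = ""
    · simp [h, ih]
    · simp only [if_neg h]
      cases (PySem.Dict.mk d).get? (PySem.Str.strip sn) with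
      | none => simp [ih]
      | some b =>
        by_cases hb : b = r
        · subst hb; simp [ih]
        · simp [hb]

theorem pvScan_none (d : List (String × String)) :
    ∀ (l : List String),
      pvScan d l none =
        match pvBins d l with
        | [] => none
        | b :: bs => if bs.all (fun x => x == b) then some b else some "MIXED" := by
  intro l
  induction l with
  | nil => simp [pvScan, pvBins]
  | cons sn rest ih =>
    simp only [pvScan, pvBins]
    by_cases h : sn = ""
    · simp [h, ih]
    · simp only [if_neg h]
      cases (PySem.Dict.mk d).get? (PySem.Str.strip sn) with
      | none => simp [ih]
      | some b => simp [pvScan_some]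

theorem pvOfList_all_eq (b : String) :
    ∀ (bs : List String), bs.all (fun x => x == b) →
      PySem.Set.ofList bs = [] ∨ PySem.Set.ofList bs = [b] := by
  intro bs
  induction bs with
  | nil => intro _; left; rfl
  | cons x xs ih =>
    intro h
    simp only [List.all_cons, Bool.and_eq_true, beq_iff_eq] at h
    obtain ⟨hx, hxs⟩ := h
    subst hx
    rcases ih (by simpa using hxs) with h | h <;>
      simp [PySem.Set.ofList_cons, h, PySem.Set.discard]

theorem pvSetLen_one (b : String) (bs : List String) :
    (PySem.Set.ofList (b :: bs)).length = 1 ↔ bs.all (fun x => x == b) = true := by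
  constructor
  · intro h
    by_contra hall
    simp only [List.all_eq_true, beq_iff_eq] at hall
    push Not at hall
    obtain ⟨x, hx, hxb⟩ := hall
    have hbmem : b ∈ PySem.Set.ofList (b :: bs) := by
      rw [PySem.Set.mem_ofList]; exact List.mem_cons_self ..
    have hxmem : x ∈ PySem.Set.ofList (b :: bs) := by
      rw [PySem.Set.mem_ofList]; exact List.mem_cons_of_mem _ hx
    rcases List.length_eq_one_iff.mp h with ⟨y, hy⟩
    rw [hy] at hbmem hxmem
    simp only [List.mem_singleton] at hbmem hxmem
    exact hxb (hxmem.trans hbmem.symm)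
  · intro h
    rcases pvOfList_all_eq b bs h with h | h <;>
      simp [PySem.Set.ofList_cons, h, PySem.Set.discard]

-- ===== VERDICT (by name: the statement is the Claim_ definition above) =====
theorem get_hb_bin_spec : Claim_equal_get_hb_bin := by
  intro l d _
  unfold Spec_get_hb_bin get_hb_bin get_hb_bin_alt
  rw [pvFoldl_bins d l [], List.nil_append, pvScan_none]
  cases hb : pvBins d l with
  | nil => simp
  | cons b bs =>
    simp only [reduceCtorEq, if_false]
    have hlen : PySem.Set.len (PySem.Set.ofList (b :: bs)) = 1 ↔
        bs.all (fun x => x == b) = true := by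
      rw [show PySem.Set.len (PySem.Set.ofList (b :: bs)) =
            ((PySem.Set.ofList (b :: bs)).length : Int) from rfl]
      rw [← pvSetLen_one b bs]
      omega
    by_cases hall : bs.all (fun x => x == b) = true
    · rw [if_pos (hlen.mpr hall), if_pos hall]
      simp [PySem.List.pyGet?, PySem.List.pyIdx?]
    · rw [if_neg (fun hc => hall (hlen.mp hc)), if_neg hall]
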